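-- pv_equiv track=rewrite | github.com/Mamoonkhan11/Aionix-Agent | backend/ai_engine/agents/news_agent.py | _cluster_articles
-- ===== SOURCE A (Python) =====
-- from typing import Any, Dict, List, Optional
--
-- def _cluster_articles(articles: List[Dict]) -> Dict[str, List[Dict]]:
--     """Cluster articles by topic/similarity."""
--     # Simple clustering based on title keywords
--     clusters = {}
--
--     for article in articles:
--         title = article.get("title", "").lower()
--
--         # Determine topic based on keywords
--         if any(word in title for word in ["tech", "ai", "software", "app", "digital"]):
--             topic = "Technology"
--         elif any(word in title for word in ["business", "market", "economy", "finance", "stock"]):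
--             topic = "Business & Finance"
--         elif any(word in title for word in ["politics", "government", "election", "policy"]):
--             topic = "Politics"
--         elif any(word in title for word in ["health", "medical", "covid", "treatment"]):
--             topic = "Health & Medicine"
--         elif any(word in title for word in ["science", "research", "study", "discovery"]):
--             topic = "Science & Research"
--         else:
--             topic = "General News"
--
--         if topic not in clusters:
--             clusters[topic] = []
--         clusters[topic].append(article)
--
--     return clusters
-- ===== SOURCE B (Python) =====
-- # Staged re-implementation: flatten the keyword rules into one keyword->topic list,
-- # compute every article's topic in a first map pass, then build each cluster by
-- # filtering (dict-comprehension over the deduplicated topic order) instead of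
-- # appending into an incrementally built dict.
-- TOPIC_RULES = [
--     ("Technology", ["tech", "ai", "software", "app", "digital"]),
--     ("Business & Finance", ["business", "market", "economy", "finance", "stock"]),
--     ("Politics", ["politics", "government", "election", "policy"]),
--     ("Health & Medicine", ["health", "medical", "covid", "treatment"]),
--     ("Science & Research", ["science", "research", "study", "discovery"]),
-- ]
-- KEYWORD_TOPIC = [(w, t) for t, ws in TOPIC_RULES for w in ws]
--
--
-- def _topic(title):
--     # first keyword that occurs in the title decides the topic; the flattened
--     # list preserves the rules' priority order, so this equals the if/elif chain
--     return next((t for w, t in KEYWORD_TOPIC if w in title), "General News")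
--
--
-- def _cluster_articles(articles):
--     topics = [_topic(a.get("title", "").lower()) for a in articles]
--     return {t: [a for a, tt in zip(articles, topics) if tt == t]
--             for t in dict.fromkeys(topics)}
-- ===== Notes on version B (the rewrite author's own statement) =====
-- stated objective: alternative
-- what changed: B replaces A's incremental dict-of-lists loop by staged passes: a map pass computing each article's topic via one flattened keyword->topic list, an ordered dedup of the topics, and a grouping pass that builds each bucket by filtering zip(articles, topics).
import Mathlib
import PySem

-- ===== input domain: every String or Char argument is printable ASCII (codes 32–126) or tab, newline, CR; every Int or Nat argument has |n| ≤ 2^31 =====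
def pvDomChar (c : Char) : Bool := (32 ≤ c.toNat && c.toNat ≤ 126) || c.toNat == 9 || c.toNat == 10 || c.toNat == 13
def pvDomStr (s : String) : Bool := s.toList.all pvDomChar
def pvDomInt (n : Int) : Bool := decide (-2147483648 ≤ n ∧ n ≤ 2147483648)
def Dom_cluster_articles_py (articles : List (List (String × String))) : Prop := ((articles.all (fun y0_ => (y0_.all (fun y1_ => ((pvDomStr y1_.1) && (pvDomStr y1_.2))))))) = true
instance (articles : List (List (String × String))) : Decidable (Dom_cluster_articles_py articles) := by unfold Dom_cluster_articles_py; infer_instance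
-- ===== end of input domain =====

-- B replaces A's incremental dict-of-lists loop by staged passes (map topics, ordered
-- dedup, group by filtering) with a flattened keyword->topic table (alternative).
-- ===== PORT A =====
-- A's if/elif chain picking the topic from the lowercased title
def pyAtopic (title : String) : String :=
  if ["tech", "ai", "software", "app", "digital"].any (fun w => PySem.Str.isIn w title) then "Technology"
  else if ["business", "market", "economy", "finance", "stock"].any (fun w => PySem.Str.isIn w title) then "Business & Finance"
  else if ["politics", "government", "election", "policy"].any (fun w => PySem.Str.isIn w title) then "Politics"
  else if ["health", "medical", "covid", "treatment"].any (fun w => PySem.Str.isIn w title) then "Health & Medicine"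
  else if ["science", "research", "study", "discovery"].any (fun w => PySem.Str.isIn w title) then "Science & Research"
  else "General News"

-- one iteration of A's for-loop: insert [] if the topic key is missing, then append
def pyAstep (clusters : PySem.Dict String (List (List (String × String)))) (article : List (String × String)) : PySem.Dict String (List (List (String × String))) :=
  let title := PySem.Str.lower (((article.find? (fun kv => kv.1 == "title")).map Prod.snd).getD "")
  let topic := pyAtopic title
  let clusters := if (PySem.Dict.get? clusters topic).isNone then PySem.Dict.insert clusters topic [] else clusters
  PySem.Dict.modify clusters topic [] (fun l => l ++ [article])

def cluster_articles_py (articles : List (List (String × String))) : List (String × List (List (String × String))) :=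
  (articles.foldl pyAstep PySem.Dict.empty).items

-- ===== PORT B =====
-- B's ordered rule table and its flattened keyword->topic list (KEYWORD_TOPIC)
def pvRules : List (String × List String) :=
  [("Technology", ["tech", "ai", "software", "app", "digital"]),
   ("Business & Finance", ["business", "market", "economy", "finance", "stock"]),
   ("Politics", ["politics", "government", "election", "policy"]),
   ("Health & Medicine", ["health", "medical", "covid", "treatment"]),
   ("Science & Research", ["science", "research", "study", "discovery"])]

def pvKwTopic : List (String × String) :=
  pvRules.flatMap (fun r => r.2.map (fun w => (w, r.1)))

-- B's _topic: first keyword of the flattened list occurring in the title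
def pyBtopic (title : String) : String :=
  ((pvKwTopic.find? (fun p => PySem.Str.isIn p.1 title)).map Prod.snd).getD "General News"

-- B: map pass computing topics, then a grouping comprehension over the deduplicated topics
def cluster_articles_py_alt (articles : List (List (String × String))) : List (String × List (List (String × String))) :=
  let topics := articles.map (fun a => pyBtopic (PySem.Str.lower (((a.find? (fun kv => kv.1 == "title")).map Prod.snd).getD "")))
  (PySem.List.dedup topics).map (fun t => (t, ((articles.zip topics).filter (fun p => p.2 == t)).map Prod.fst))

-- ===== PRECONDITION & SPEC =====
def Spec_cluster_articles_py (articles : List (List (String × String))) (out : List (String × List (List (String × String)))) : Prop := out = cluster_articles_py_alt articles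
instance (articles : List (List (String × String))) (out : List (String × List (List (String × String)))) : Decidable (Spec_cluster_articles_py articles out) := by unfold Spec_cluster_articles_py; infer_instance

-- ===== CLAIM =====
def Claim_equal_cluster_articles_py : Prop := ∀ (articles : List (List (String × String))), Dom_cluster_articles_py articles → Spec_cluster_articles_py articles (cluster_articles_py articles)

-- ===== LEMMAS AND PROOFS =====
-- B's and A's title expressions coincide (shared abbreviation for the proofs)
def pvTitle (a : List (String × String)) : String :=
  PySem.Str.lower (((a.find? (fun kv => kv.1 == "title")).map Prod.snd).getD "")

-- find? over a flattened group (ws mapped to a common topic g ++ rest) = if any ws matches then g else find? rest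
theorem find?_flat (g : String) (ws : List String) (rest : List (String × String)) (title : String) :
    (((ws.map (fun w => (w, g)) ++ rest).find? (fun p => PySem.Str.isIn p.1 title)).map Prod.snd).getD "General News"
      = if ws.any (fun w => PySem.Str.isIn w title) then g
        else (((rest.find? (fun p => PySem.Str.isIn p.1 title)).map Prod.snd).getD "General News") := by
  induction ws with
  | nil => simp
  | cons w ws ih =>
    simp only [List.map_cons, List.cons_append, List.any_cons]
    by_cases h : PySem.Chars.isIn w.toList title.toList = true
    · rw [List.find?_cons_of_pos (by simp [PySem.Str.isIn_eq, h])]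
      simp [PySem.Str.isIn_eq, h]
    · rw [List.find?_cons_of_neg (by simp [PySem.Str.isIn_eq, h])]
      simp only [Bool.not_eq_true] at h
      rw [ih]
      simp [PySem.Str.isIn_eq, h]

-- A's branch chain equals B's flattened first-match scan on every title
theorem topic_eq (title : String) : pyAtopic title = pyBtopic title := by
  unfold pyAtopic pyBtopic pvKwTopic pvRules
  simp only [List.flatMap_cons, List.flatMap_nil, List.append_nil]
  rw [find?_flat, find?_flat, find?_flat, find?_flat]
  have : ((["science", "research", "study", "discovery"].map (fun w => (w, "Science & Research"))).find? (fun p => PySem.Str.isIn p.1 title)) = ((["science", "research", "study", "discovery"].map (fun w => (w, "Science & Research")) ++ ([] : List (String × String))).find? (fun p => PySem.Str.isIn p.1 title)) := by simp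
  rw [show (["science", "research", "study", "discovery"].map (fun w => (w, "Science & Research"))) = (["science", "research", "study", "discovery"].map (fun w => (w, "Science & Research")) ++ ([] : List (String × String))) by simp, find?_flat]
  simp

-- A's step is a single Dict.modify keyed by B's topic function
theorem stepA_modify : pyAstep = fun d a => PySem.Dict.modify d (pyBtopic (pvTitle a)) [] (fun l => l ++ [a]) := by
  funext d a
  simp only [pyAstep, pvTitle, topic_eq]
  generalize pyBtopic _ = k
  rcases h : PySem.Dict.get? d k with _ | v <;>
    simp [PySem.Dict.modify, h, PySem.Dict.getD, PySem.Dict.insert_insert_self]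

-- zipping a list with its own map is mapping to pairs
theorem pv_zip_map {α β : Type} (f : α → β) (l : List α) :
    l.zip (l.map f) = l.map (fun a => (a, f a)) := by
  induction l with
  | nil => rfl
  | cons a as ih => simp [ih]

-- grouping by the first component of (f a, a)-pairs = grouping by the second of (a, f a)-pairs
theorem pv_group_eq {α : Type} (f : α → String) (t : String) (l : List α) :
    ((l.map (fun a => (f a, a))).filter (fun p => p.1 == t)).map Prod.snd
      = ((l.zip (l.map f)).filter (fun p => p.2 == t)).map Prod.fst := by
  rw [pv_zip_map]
  induction l with
  | nil => rfl
  | cons a as ih =>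
    simp only [List.map_cons, List.filter_cons]
    cases h : f a == t <;> simp [ih]

-- ===== VERDICT =====
theorem cluster_articles_py_spec : Claim_equal_cluster_articles_py := by
  intro articles _
  unfold Spec_cluster_articles_py cluster_articles_py cluster_articles_py_alt
  rw [stepA_modify]
  have hfold : articles.foldl (fun d a => PySem.Dict.modify d (pyBtopic (pvTitle a)) [] (fun l => l ++ [a])) PySem.Dict.empty
      = (articles.map (fun a => (pyBtopic (pvTitle a), a))).foldl (fun d p => PySem.Dict.modify d p.1 [] (fun l => l ++ [p.2])) PySem.Dict.empty := by
    rw [List.foldl_map]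
  rw [hfold]
  set pairs := articles.map (fun a => (pyBtopic (pvTitle a), a)) with hpairs
  set D := pairs.foldl (fun d p => PySem.Dict.modify d p.1 [] (fun l => l ++ [p.2])) PySem.Dict.empty with hD
  have hnodup : D.keys.Nodup := by
    rw [hD]
    exact PySem.Dict.nodup_keys_foldl_modify_key pairs Prod.fst [] (fun d p => (fun l => l ++ [p.2])) PySem.Dict.empty (by simp)
  have hkeys : D.keys = PySem.List.dedup (articles.map (fun a => pyBtopic (pvTitle a))) := by
    rw [hD, PySem.Dict.keys_foldl_modify_key]
    simp [hpairs, PySem.Set.update_nil_left, List.map_map, Function.comp_def]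
  have hget : ∀ t, D.getD t [] = (pairs.filter (fun p => p.1 == t)).map Prod.snd := by
    intro t
    rw [hD, PySem.Dict.getD_foldl_modify_append]
    simp
  rw [PySem.Dict.items_eq_map_keys D hnodup [], hkeys]
  apply List.map_congr_left
  intro t _
  refine congrArg _ ?_
  rw [hget, hpairs]
  exact pv_group_eq (fun a => pyBtopic (pvTitle a)) t articles
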